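-- pv_equiv track=rewrite | github.com/kh277/BOJ | 백준/Gold/16117. 실버런/실버런.py | solve
-- ===== SOURCE A (Python) =====
-- def solve(X, Y, silver):
--     # 정수 좌표 시작 DP
--     DP = [[0] * X for _ in range(Y)]
--     for x in range(X):
--         DP[0][x] = silver[0][x]
--     for y in range(1, Y):
--         for x in range(X):
--             if x > 0:       # 위로 이동
--                 DP[y][x] = max(DP[y][x], DP[y-1][x-1] + silver[y][x])
--             if x < X-1:     # 아래로 이동
--                 DP[y][x] = max(DP[y][x], DP[y-1][x+1] + silver[y][x])
--             if y > 1:       # 앞으로 이동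
--                 DP[y][x] = max(DP[y][x], DP[y-2][x] + silver[y-1][x] + silver[y][x])
--             if y == 1:      # -1에서 앞으로 이동
--                 DP[y][x] = max(DP[y][x], DP[y-1][x] + silver[y][x])
--             if y == Y-1:    # Y-1에서 앞으로 이동
--                 DP[y][x] = max(DP[y][x], DP[y-1][x] + silver[y][x])
--
--     result = max(DP[Y-1])
--
--     # .5 좌표 시작 DP
--     DP = [[0] * (X+1) for _ in range(Y+1)]
--     for y in range(1, Y+1):
--         DP[y][0] = DP[y-1][1] + silver[y-1][0]
--         DP[y][X] = DP[y-1][X-1] + silver[y-1][X-1]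
--         for x in range(1, X):
--             DP[y][x] = max(DP[y-1][x-1] + silver[y-1][x-1], DP[y-1][x+1] + silver[y-1][x])
--
--     result = max(result, max(DP[Y]))
--     return result
-- ===== SOURCE B (Python) =====
-- def solve(X, Y, silver):
--     # Top-down memoized recursion: each cell's best value is a recursive
--     # function of its predecessors, cached in a dict; no DP tables, no
--     # row/column loops over the grid.
--     memo = {}
--
--     def best(y, x):
--         # best total ending at integer-coordinate cell (y, x)
--         if y == 0:
--             return silver[0][x]
--         if (y, x) in memo:
--             return memo[(y, x)]
--         v = 0
--         if x >= 1:
--             v = max(v, best(y - 1, x - 1) + silver[y][x])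
--         if x + 1 < X:
--             v = max(v, best(y - 1, x + 1) + silver[y][x])
--         if y >= 2:
--             v = max(v, best(y - 2, x) + silver[y - 1][x] + silver[y][x])
--         if y == 1 or y == Y - 1:
--             v = max(v, best(y - 1, x) + silver[y][x])
--         memo[(y, x)] = v
--         return v
--
--     memoh = {}
--
--     def besth(y, x):
--         # best total ending at half-coordinate position x of row boundary y
--         if y == 0:
--             return 0
--         if (y, x) in memoh:
--             return memoh[(y, x)]
--         if x == 0:
--             v = besth(y - 1, 1) + silver[y - 1][0]
--         elif x == X:
--             v = besth(y - 1, X - 1) + silver[y - 1][X - 1]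
--         else:
--             v = max(besth(y - 1, x - 1) + silver[y - 1][x - 1],
--                     besth(y - 1, x + 1) + silver[y - 1][x])
--         memoh[(y, x)] = v
--         return v
--
--     result = max(best(Y - 1, x) for x in range(X))
--     return max(result, max(besth(Y, x) for x in range(X + 1)))
-- ===== Notes on version B (the rewrite author's own statement) =====
-- stated objective: alternative
-- what changed: Replaces A's bottom-up table DP (two 2-D lists filled by nested y/x loops) with top-down memoized recursion: two recursive functions best(y,x)/besth(y,x) define each cell's value from its predecessors and cache results in dictionaries, the answer being a max over the two recursively evaluated last rows; no DP tables and no loops over the grid remain.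
import Mathlib
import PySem

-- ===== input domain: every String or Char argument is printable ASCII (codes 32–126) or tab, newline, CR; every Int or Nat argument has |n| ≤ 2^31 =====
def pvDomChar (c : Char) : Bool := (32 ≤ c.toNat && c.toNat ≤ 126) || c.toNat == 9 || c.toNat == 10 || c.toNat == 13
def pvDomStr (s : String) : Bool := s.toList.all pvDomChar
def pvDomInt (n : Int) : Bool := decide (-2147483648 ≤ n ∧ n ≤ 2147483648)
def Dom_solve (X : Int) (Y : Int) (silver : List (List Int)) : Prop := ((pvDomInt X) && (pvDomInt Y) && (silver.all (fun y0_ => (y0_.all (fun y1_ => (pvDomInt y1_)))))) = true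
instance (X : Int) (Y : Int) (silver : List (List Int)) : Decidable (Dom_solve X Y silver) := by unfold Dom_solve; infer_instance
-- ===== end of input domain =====

-- B replaces A's bottom-up table DP with top-down memoized recursion (two recursive
-- cell functions cached in dictionaries); same return value (objective: alternative).

-- silver[y][x]; inside Pre_solve every access is in range, so the defaults are never used.
def pvGA (silver : List (List Int)) (y x : Nat) : Int := (silver.getD y []).getD x 0

-- ===== PORT A =====
def solve (X : Int) (Y : Int) (silver : List (List Int)) : Int :=
  let Xn := X.toNat
  let Yn := Y.toNat
  -- DP = [[0]*X for _ in range(Y)]; for x in range(X): DP[0][x] = silver[0][x]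
  let DP0 : List (List Int) := List.replicate Yn (List.replicate Xn 0)
  let DP1 := DP0.set 0 ((List.range Xn).foldl (fun r x => r.set x (pvGA silver 0 x)) (DP0.getD 0 []))
  -- for y in range(1, Y): for x in range(X): the five chained max-updates
  let DP2 := (List.range' 1 (Yn - 1)).foldl (fun T y =>
      T.set y ((List.range Xn).foldl (fun r x =>
        let v := r.getD x 0
        let v := if 1 ≤ x then max v ((T.getD (y-1) []).getD (x-1) 0 + pvGA silver y x) else v
        let v := if x + 1 < Xn then max v ((T.getD (y-1) []).getD (x+1) 0 + pvGA silver y x) else v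
        let v := if 2 ≤ y then max v ((T.getD (y-2) []).getD x 0 + pvGA silver (y-1) x + pvGA silver y x) else v
        let v := if y = 1 then max v ((T.getD (y-1) []).getD x 0 + pvGA silver y x) else v
        let v := if y = Yn - 1 then max v ((T.getD (y-1) []).getD x 0 + pvGA silver y x) else v
        r.set x v) (T.getD y []))) DP1
  let result := (PySem.List.max? (DP2.getD (Yn - 1) []) (fun v => v)).getD 0
  -- DP = [[0]*(X+1) for _ in range(Y+1)]; the .5-start pull DP
  let H0 : List (List Int) := List.replicate (Yn + 1) (List.replicate (Xn + 1) 0)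
  let H := (List.range' 1 Yn).foldl (fun T y =>
      let prev := T.getD (y-1) []
      let r := T.getD y []
      let r := r.set 0 (prev.getD 1 0 + pvGA silver (y-1) 0)
      let r := r.set Xn (prev.getD (Xn-1) 0 + pvGA silver (y-1) (Xn-1))
      let r := (List.range' 1 (Xn - 1)).foldl (fun r x =>
          r.set x (max (prev.getD (x-1) 0 + pvGA silver (y-1) (x-1))
                       (prev.getD (x+1) 0 + pvGA silver (y-1) x))) r
      T.set y r) H0
  max result ((PySem.List.max? (H.getD Yn []) (fun v => v)).getD 0)

-- ===== PORT B =====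
-- best(y, x): top-down memoized recursion for the integer-coordinate cells
-- (the memo dict is threaded through the calls, Python mutates it in place)
def bBestI (Xn Yn : Nat) (g : Nat → Nat → Int) :
    Nat → Nat → PySem.Dict (Nat × Nat) Int → Int × PySem.Dict (Nat × Nat) Int
  | 0, x, m => (g 0 x, m)
  | v + 1, x, m =>
    match m.get? (v + 1, x) with
    | some w => (w, m)
    | none =>
      let p1 : Int × PySem.Dict (Nat × Nat) Int :=
        if 1 ≤ x then
          let q := bBestI Xn Yn g v (x - 1) m
          (max 0 (q.1 + g (v + 1) x), q.2)
        else (0, m)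
      let p2 :=
        if x + 1 < Xn then
          let q := bBestI Xn Yn g v (x + 1) p1.2
          (max p1.1 (q.1 + g (v + 1) x), q.2)
        else p1
      let p3 :=
        if 2 ≤ v + 1 then
          let q := bBestI Xn Yn g (v - 1) x p2.2
          (max p2.1 (q.1 + g v x + g (v + 1) x), q.2)
        else p2
      let p4 :=
        if v + 1 = 1 ∨ v + 1 = Yn - 1 then
          let q := bBestI Xn Yn g v x p3.2
          (max p3.1 (q.1 + g (v + 1) x), q.2)
        else p3
      (p4.1, p4.2.insert (v + 1, x) p4.1)
  termination_by y _ _ => y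
  decreasing_by all_goals omega

-- besth(y, x): top-down memoized recursion for the half-coordinate positions
def bBestH (Xn : Nat) (g : Nat → Nat → Int) :
    Nat → Nat → PySem.Dict (Nat × Nat) Int → Int × PySem.Dict (Nat × Nat) Int
  | 0, _, m => (0, m)
  | v + 1, x, m =>
    match m.get? (v + 1, x) with
    | some w => (w, m)
    | none =>
      let p : Int × PySem.Dict (Nat × Nat) Int :=
        if x = 0 then
          let q := bBestH Xn g v 1 m
          (q.1 + g v 0, q.2)
        else if x = Xn then
          let q := bBestH Xn g v (Xn - 1) m
          (q.1 + g v (Xn - 1), q.2)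
        else
          let q1 := bBestH Xn g v (x - 1) m
          let q2 := bBestH Xn g v (x + 1) q1.2
          (max (q1.1 + g v (x - 1)) (q2.1 + g v x), q2.2)
      (p.1, p.2.insert (v + 1, x) p.1)

def solve_alt (X : Int) (Y : Int) (silver : List (List Int)) : Int :=
  let Xn := X.toNat
  let Yn := Y.toNat
  -- result = max(best(Y-1, x) for x in range(X)), threading the memo
  let s := (List.range Xn).foldl
      (fun (st : List Int × PySem.Dict (Nat × Nat) Int) x =>
        let q := bBestI Xn Yn (pvGA silver) (Yn - 1) x st.2
        (st.1 ++ [q.1], q.2)) ([], PySem.Dict.empty)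
  let result := (PySem.List.max? s.1 (fun v => v)).getD 0
  -- max(result, max(besth(Y, x) for x in range(X+1)))
  let t := (List.range (Xn + 1)).foldl
      (fun (st : List Int × PySem.Dict (Nat × Nat) Int) x =>
        let q := bBestH Xn (pvGA silver) Yn x st.2
        (st.1 ++ [q.1], q.2)) ([], PySem.Dict.empty)
  max result ((PySem.List.max? t.1 (fun v => v)).getD 0)

-- ===== PRECONDITION & SPEC =====
-- Pre_solve is exactly A's non-raising domain: A raises (IndexError/ValueError) iff X < 1 or
-- Y < 1 (empty row/table, max of an empty list) or silver has fewer than Y rows or one of the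
-- first Y rows is shorter than X.
def Pre_solve (X : Int) (Y : Int) (silver : List (List Int)) : Prop :=
  1 ≤ X ∧ 1 ≤ Y ∧ Y.toNat ≤ silver.length ∧ ∀ r ∈ silver.take Y.toNat, X.toNat ≤ r.length
instance (X : Int) (Y : Int) (silver : List (List Int)) : Decidable (Pre_solve X Y silver) := by
  unfold Pre_solve; infer_instance

def pvWitness_solve : Int × Int × List (List Int) := (2, 2, [[1, 2], [3, 4]])

def Spec_solve (X : Int) (Y : Int) (silver : List (List Int)) (out : Int) : Prop := out = solve_alt X Y silver
instance (X : Int) (Y : Int) (silver : List (List Int)) (out : Int) : Decidable (Spec_solve X Y silver out) := by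
  unfold Spec_solve; infer_instance

-- ===== CLAIM (what is proved, stated in full; the proofs are below) =====
def Claim_equal_solve : Prop := ∀ (X : Int) (Y : Int) (silver : List (List Int)), Dom_solve X Y silver → Pre_solve X Y silver → Spec_solve X Y silver (solve X Y silver)

-- ===== LEMMAS AND PROOFS =====

theorem pv_getD_map_range {α : Type} (f : Nat → α) (n i : Nat) (d : α) :
    ((List.range n).map f).getD i d = if i < n then f i else d := by
  rcases Nat.lt_or_ge i n with h | h
  · rw [if_pos h, List.getD_eq_getElem?_getD]; simp [h]
  · rw [if_neg (by omega), List.getD_eq_getElem?_getD,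
      List.getElem?_eq_none (by simp; omega)]; rfl

theorem pv_set_map_range {α : Type} (f : Nat → α) (n i : Nat) (v : α) :
    ((List.range n).map f).set i v = (List.range n).map (fun j => if j = i then v else f j) := by
  apply List.ext_getElem
  · simp
  · intro j h1 h2
    have hj : j < n := by simpa using h2
    rw [List.getElem_set]
    simp only [List.getElem_map, List.getElem_range]
    split_ifs with h3 h4 h4
    · rfl
    · omega
    · omega
    · rfl

theorem pv_map_ext {α : Type} (n : Nat) (f f' : Nat → α) (h : ∀ j, j < n → f j = f' j) :
    (List.range n).map f = (List.range n).map f' := by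
  apply List.map_congr_left
  intro j hj
  exact h j (by simpa using hj)

theorem pv_replicate_eq {α : Type} (n : Nat) (a : α) :
    List.replicate n a = (List.range n).map (fun _ => a) := by simp

def pvCellA (Xn Yn : Nat) (g : Nat → Nat → Int) : Nat → Nat → Int
  | 0, x => g 0 x
  | v + 1, x =>
    let b : Int := 0
    let b := if 1 ≤ x then max b (pvCellA Xn Yn g v (x-1) + g (v+1) x) else b
    let b := if x + 1 < Xn then max b (pvCellA Xn Yn g v (x+1) + g (v+1) x) else b
    let b := if 2 ≤ v + 1 then max b (pvCellA Xn Yn g (v-1) x + g v x + g (v+1) x) else b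
    let b := if v + 1 = 1 then max b (pvCellA Xn Yn g v x + g (v+1) x) else b
    let b := if v + 1 = Yn - 1 then max b (pvCellA Xn Yn g v x + g (v+1) x) else b
    b
  termination_by y _ => y
  decreasing_by all_goals omega

def pvRowA (Xn Yn : Nat) (g : Nat → Nat → Int) (y : Nat) : List Int :=
  (List.range Xn).map (pvCellA Xn Yn g y)

-- A's inner x-loop fills row y of the integer-start table
theorem pvA_inner (Xn Yn : Nat) (g : Nat → Nat → Int) (y : Nat) (hy : 1 ≤ y)
    (P1 P2 : List Int) (h1 : P1 = pvRowA Xn Yn g (y-1)) (h2 : P2 = pvRowA Xn Yn g (y-2)) :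
    (List.range Xn).foldl (fun r x =>
        let v := r.getD x 0
        let v := if 1 ≤ x then max v (P1.getD (x-1) 0 + g y x) else v
        let v := if x + 1 < Xn then max v (P1.getD (x+1) 0 + g y x) else v
        let v := if 2 ≤ y then max v (P2.getD x 0 + g (y-1) x + g y x) else v
        let v := if y = 1 then max v (P1.getD x 0 + g y x) else v
        let v := if y = Yn - 1 then max v (P1.getD x 0 + g y x) else v
        r.set x v) (List.replicate Xn 0) = pvRowA Xn Yn g y := by
  obtain ⟨w, rfl⟩ : ∃ w, y = w + 1 := ⟨y - 1, by omega⟩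
  simp only [Nat.add_sub_cancel] at h1 ⊢
  have key : ∀ k, k ≤ Xn →
      (List.range k).foldl (fun r x =>
        let v := r.getD x 0
        let v := if 1 ≤ x then max v (P1.getD (x-1) 0 + g (w+1) x) else v
        let v := if x + 1 < Xn then max v (P1.getD (x+1) 0 + g (w+1) x) else v
        let v := if 2 ≤ w + 1 then max v (P2.getD x 0 + g w x + g (w+1) x) else v
        let v := if w + 1 = 1 then max v (P1.getD x 0 + g (w+1) x) else v
        let v := if w + 1 = Yn - 1 then max v (P1.getD x 0 + g (w+1) x) else v
        r.set x v) (List.replicate Xn 0)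
      = (List.range Xn).map (fun j => if j < k then pvCellA Xn Yn g (w+1) j else 0) := by
    intro k
    induction k with
    | zero =>
      intro _
      rw [pv_replicate_eq]
      exact pv_map_ext _ _ _ (by intro j hj; simp)
    | succ k ih =>
      intro hk1
      rw [List.range_succ, List.foldl_append, List.foldl_cons, List.foldl_nil, ih (by omega)]
      have hklt : k < Xn := by omega
      dsimp only
      rw [pv_getD_map_range]
      rw [if_pos hklt, if_neg (by omega : ¬ k < k)]
      rw [h1, h2]
      simp only [pvRowA, pv_getD_map_range]
      rw [pv_set_map_range]
      apply pv_map_ext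
      intro j hj
      by_cases hjk : j = k
      · subst hjk
        have e1 : j - 1 < Xn := by omega
        rw [if_pos rfl, if_pos (show j < j + 1 by omega)]
        rw [show pvCellA Xn Yn g (w+1) j =
          (let b : Int := 0
           let b := if 1 ≤ j then max b (pvCellA Xn Yn g w (j-1) + g (w+1) j) else b
           let b := if j + 1 < Xn then max b (pvCellA Xn Yn g w (j+1) + g (w+1) j) else b
           let b := if 2 ≤ w + 1 then max b (pvCellA Xn Yn g (w-1) j + g w j + g (w+1) j) else b
           let b := if w + 1 = 1 then max b (pvCellA Xn Yn g w j + g (w+1) j) else b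
           let b := if w + 1 = Yn - 1 then max b (pvCellA Xn Yn g w j + g (w+1) j) else b
           b) from by rw [pvCellA]]
        simp only [show w + 1 - 2 = w - 1 from by omega]
        rw [if_pos e1]
        simp only [if_pos hj]
        by_cases c2 : j + 1 < Xn
        · simp only [if_pos c2]
        · simp only [if_neg c2]
      · rw [if_neg hjk]
        by_cases hlt : j < k
        · rw [if_pos hlt, if_pos (by omega)]
        · rw [if_neg hlt, if_neg (by omega)]
  rw [key Xn (le_refl Xn)]
  exact pv_map_ext _ _ _ (by intro j hj; rw [if_pos hj])

theorem pv_fill (n : Nat) (f : Nat → Int) :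
    (List.range n).foldl (fun r x => r.set x (f x)) (List.replicate n 0) = (List.range n).map f := by
  have key : ∀ k, k ≤ n → (List.range k).foldl (fun r x => r.set x (f x)) (List.replicate n 0)
      = (List.range n).map (fun j => if j < k then f j else 0) := by
    intro k
    induction k with
    | zero =>
      intro _
      rw [pv_replicate_eq]
      exact pv_map_ext _ _ _ (by intro j hj; simp)
    | succ k ih =>
      intro hk1
      rw [List.range_succ, List.foldl_append, List.foldl_cons, List.foldl_nil, ih (by omega)]
      rw [pv_set_map_range]
      apply pv_map_ext
      intro j hj
      by_cases hjk : j = k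
      · rw [if_pos hjk, if_pos (by omega), hjk]
      · rw [if_neg hjk]
        by_cases hlt : j < k
        · rw [if_pos hlt, if_pos (by omega)]
        · rw [if_neg hlt, if_neg (by omega)]
  rw [key n (le_refl n)]
  exact pv_map_ext _ _ _ (by intro j hj; rw [if_pos hj])

def pvTA (Xn Yn : Nat) (g : Nat → Nat → Int) (k : Nat) : List (List Int) :=
  (List.range Yn).map (fun j => if j ≤ k then pvRowA Xn Yn g j else List.replicate Xn 0)

-- A's row-0 initialisation produces the table pvTA 0
theorem pvA_init (Xn Yn : Nat) (g : Nat → Nat → Int) (hY : 1 ≤ Yn) :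
    (List.replicate Yn (List.replicate Xn 0)).set 0
      ((List.range Xn).foldl (fun r x => r.set x (g 0 x))
        ((List.replicate Yn (List.replicate Xn 0)).getD 0 [])) = pvTA Xn Yn g 0 := by
  have hget : (List.replicate Yn (List.replicate Xn (0:Int))).getD 0 [] = List.replicate Xn 0 := by
    rw [pv_replicate_eq Yn, pv_getD_map_range, if_pos (by omega)]
  rw [hget, pv_fill]
  have hrow : (List.range Xn).map (fun x => g 0 x) = pvRowA Xn Yn g 0 := by
    apply pv_map_ext
    intro j hj
    simp [pvCellA]
  rw [hrow, pv_replicate_eq Yn, pv_set_map_range, pvTA]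
  apply pv_map_ext
  intro j hj
  by_cases hj0 : j = 0
  · rw [if_pos hj0, if_pos (by omega), hj0]
  · rw [if_neg hj0, if_neg (by omega)]

-- A's outer y-loop fills the integer-start table up to row k
theorem pvA_outer (Xn Yn : Nat) (g : Nat → Nat → Int) (hY : 1 ≤ Yn) :
    ∀ k, k ≤ Yn - 1 →
    (List.range' 1 k).foldl (fun T y =>
      T.set y ((List.range Xn).foldl (fun r x =>
        let v := r.getD x 0
        let v := if 1 ≤ x then max v ((T.getD (y-1) []).getD (x-1) 0 + g y x) else v
        let v := if x + 1 < Xn then max v ((T.getD (y-1) []).getD (x+1) 0 + g y x) else v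
        let v := if 2 ≤ y then max v ((T.getD (y-2) []).getD x 0 + g (y-1) x + g y x) else v
        let v := if y = 1 then max v ((T.getD (y-1) []).getD x 0 + g y x) else v
        let v := if y = Yn - 1 then max v ((T.getD (y-1) []).getD x 0 + g y x) else v
        r.set x v) (T.getD y []))) (pvTA Xn Yn g 0)
    = pvTA Xn Yn g k := by
  intro k
  induction k with
  | zero => intro _; rfl
  | succ k ih =>
    intro hk1
    rw [List.range'_concat, one_mul, List.foldl_append, List.foldl_cons, List.foldl_nil,
      ih (by omega)]
    dsimp only
    have hy1 : (pvTA Xn Yn g k).getD (1+k-1) [] = pvRowA Xn Yn g (1+k-1) := by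
      rw [pvTA, pv_getD_map_range, if_pos (show 1+k-1 < Yn by omega), if_pos (by omega)]
    have hy2 : (pvTA Xn Yn g k).getD (1+k-2) [] = pvRowA Xn Yn g (1+k-2) := by
      rw [pvTA, pv_getD_map_range, if_pos (show 1+k-2 < Yn by omega), if_pos (by omega)]
    have hy0 : (pvTA Xn Yn g k).getD (1+k) [] = List.replicate Xn 0 := by
      rw [pvTA, pv_getD_map_range, if_pos (show 1+k < Yn by omega), if_neg (by omega)]
    rw [hy1, hy2, hy0]
    rw [pvA_inner Xn Yn g (1+k) (by omega) _ _ rfl rfl]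
    rw [pvTA, pv_set_map_range, pvTA]
    apply pv_map_ext
    intro j hj
    by_cases hj1 : j = 1 + k
    · rw [if_pos hj1, if_pos (by omega), hj1]
    · rw [if_neg hj1]
      by_cases hj2 : j ≤ k
      · rw [if_pos hj2, if_pos (by omega)]
      · rw [if_neg hj2, if_neg (by omega)]

def pvCellH (Xn : Nat) (g : Nat → Nat → Int) : Nat → Nat → Int
  | 0, _ => 0
  | v + 1, x =>
    if x = 0 then pvCellH Xn g v 1 + g v 0
    else if x = Xn then pvCellH Xn g v (Xn-1) + g v (Xn-1)
    else max (pvCellH Xn g v (x-1) + g v (x-1)) (pvCellH Xn g v (x+1) + g v x)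

def pvRowH (Xn : Nat) (g : Nat → Nat → Int) (y : Nat) : List Int :=
  (List.range (Xn+1)).map (pvCellH Xn g y)

theorem pvRowH_zero (Xn : Nat) (g : Nat → Nat → Int) :
    pvRowH Xn g 0 = List.replicate (Xn+1) 0 := by
  rw [pvRowH, pv_replicate_eq]
  exact pv_map_ext _ _ _ (by intro j hj; simp [pvCellH])

-- A's inner x-loop (after the two border assignments) fills row y of the .5 table
theorem pvAH_inner (Xn : Nat) (g : Nat → Nat → Int) (y : Nat) (hX : 1 ≤ Xn) (hy : 1 ≤ y)
    (P : List Int) (hP : P = pvRowH Xn g (y-1)) :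
    (List.range' 1 (Xn - 1)).foldl (fun r x =>
        r.set x (max (P.getD (x-1) 0 + g (y-1) (x-1)) (P.getD (x+1) 0 + g (y-1) x)))
      (((List.replicate (Xn+1) 0).set 0 (P.getD 1 0 + g (y-1) 0)).set Xn
        (P.getD (Xn-1) 0 + g (y-1) (Xn-1)))
    = pvRowH Xn g y := by
  obtain ⟨w, rfl⟩ : ∃ w, y = w + 1 := ⟨y - 1, by omega⟩
  simp only [Nat.add_sub_cancel] at hP ⊢
  subst hP
  have hr1 : (pvRowH Xn g w).getD 1 0 = pvCellH Xn g w 1 := by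
    rw [pvRowH, pv_getD_map_range, if_pos (by omega)]
  have hrX : (pvRowH Xn g w).getD (Xn-1) 0 = pvCellH Xn g w (Xn-1) := by
    rw [pvRowH, pv_getD_map_range, if_pos (by omega)]
  rw [hr1, hrX]
  have hbase : ((List.replicate (Xn+1) (0:Int)).set 0 (pvCellH Xn g w 1 + g w 0)).set Xn
      (pvCellH Xn g w (Xn-1) + g w (Xn-1))
      = (List.range (Xn+1)).map (fun j => if j = 0 then pvCellH Xn g (w+1) 0
          else if j = Xn then pvCellH Xn g (w+1) Xn else 0) := by
    rw [pv_replicate_eq, pv_set_map_range, pv_set_map_range]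
    apply pv_map_ext
    intro j hj
    by_cases hj0 : j = 0
    · rw [if_neg (by omega : ¬ j = Xn), if_pos hj0, if_pos hj0]
      rw [show pvCellH Xn g (w+1) 0 = pvCellH Xn g w 1 + g w 0 from by
        rw [pvCellH, if_pos rfl]]
    · by_cases hjX : j = Xn
      · rw [if_pos hjX, if_neg hj0, if_pos hjX]
        rw [show pvCellH Xn g (w+1) Xn = pvCellH Xn g w (Xn-1) + g w (Xn-1) from by
          rw [pvCellH, if_neg (by omega), if_pos rfl]]
      · rw [if_neg hjX, if_neg hj0, if_neg hj0, if_neg hjX]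
  rw [hbase]
  have key : ∀ k, k ≤ Xn - 1 →
      (List.range' 1 k).foldl (fun r x =>
        r.set x (max ((pvRowH Xn g w).getD (x-1) 0 + g w (x-1)) ((pvRowH Xn g w).getD (x+1) 0 + g w x)))
        ((List.range (Xn+1)).map (fun j => if j = 0 then pvCellH Xn g (w+1) 0
          else if j = Xn then pvCellH Xn g (w+1) Xn else 0))
      = (List.range (Xn+1)).map (fun j => if j = 0 then pvCellH Xn g (w+1) 0
          else if j = Xn then pvCellH Xn g (w+1) Xn
          else if j < 1 + k then pvCellH Xn g (w+1) j else 0) := by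
    intro k
    induction k with
    | zero =>
      intro _
      apply pv_map_ext
      intro j hj
      by_cases hj0 : j = 0
      · rw [if_pos hj0, if_pos hj0]
      · rw [if_neg hj0, if_neg hj0]
        by_cases hjX : j = Xn
        · rw [if_pos hjX, if_pos hjX]
        · rw [if_neg hjX, if_neg hjX, if_neg (by omega)]
    | succ k ih =>
      intro hk1
      rw [List.range'_concat, one_mul, List.foldl_append, List.foldl_cons, List.foldl_nil,
        ih (by omega)]
      have e1 : (pvRowH Xn g w).getD (1+k-1) 0 = pvCellH Xn g w (1+k-1) := by
        rw [pvRowH, pv_getD_map_range, if_pos (by omega)]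
      have e2 : (pvRowH Xn g w).getD (1+k+1) 0 = pvCellH Xn g w (1+k+1) := by
        rw [pvRowH, pv_getD_map_range, if_pos (by omega)]
      rw [e1, e2, pv_set_map_range]
      apply pv_map_ext
      intro j hj
      by_cases hjk : j = 1 + k
      · rw [if_pos hjk, if_neg (by omega : ¬ j = 0), if_neg (by omega : ¬ j = Xn),
          if_pos (by omega), hjk]
        rw [show pvCellH Xn g (w+1) (1+k) = max (pvCellH Xn g w (1+k-1) + g w (1+k-1))
            (pvCellH Xn g w (1+k+1) + g w (1+k)) from by
          rw [pvCellH, if_neg (by omega), if_neg (by omega)]]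
      · rw [if_neg hjk]
        by_cases hj0 : j = 0
        · rw [if_pos hj0, if_pos hj0]
        · rw [if_neg hj0, if_neg hj0]
          by_cases hjX : j = Xn
          · rw [if_pos hjX, if_pos hjX]
          · rw [if_neg hjX, if_neg hjX]
            by_cases hlt : j < 1 + k
            · rw [if_pos hlt, if_pos (by omega)]
            · rw [if_neg hlt, if_neg (by omega)]
  rw [key (Xn - 1) (le_refl _)]
  apply pv_map_ext
  intro j hj
  by_cases hj0 : j = 0
  · rw [if_pos hj0, hj0]
  · rw [if_neg hj0]
    by_cases hjX : j = Xn
    · rw [if_pos hjX, hjX]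
    · rw [if_neg hjX, if_pos (by omega)]

def pvTH (Xn Yn : Nat) (g : Nat → Nat → Int) (k : Nat) : List (List Int) :=
  (List.range (Yn+1)).map (fun j => if j ≤ k then pvRowH Xn g j else List.replicate (Xn+1) 0)

theorem pvTH_init (Xn Yn : Nat) (g : Nat → Nat → Int) :
    List.replicate (Yn+1) (List.replicate (Xn+1) (0:Int)) = pvTH Xn Yn g 0 := by
  rw [pv_replicate_eq, pvTH]
  apply pv_map_ext
  intro j hj
  by_cases hj0 : j ≤ 0
  · rw [if_pos hj0, show j = 0 by omega, pvRowH_zero]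
  · rw [if_neg hj0]

-- A's outer y-loop fills the .5-start table up to row k
theorem pvAH_outer (Xn Yn : Nat) (g : Nat → Nat → Int) (hX : 1 ≤ Xn) :
    ∀ k, k ≤ Yn →
    (List.range' 1 k).foldl (fun T y =>
      let prev := T.getD (y-1) []
      let r := T.getD y []
      let r := r.set 0 (prev.getD 1 0 + g (y-1) 0)
      let r := r.set Xn (prev.getD (Xn-1) 0 + g (y-1) (Xn-1))
      let r := (List.range' 1 (Xn - 1)).foldl (fun r x =>
          r.set x (max (prev.getD (x-1) 0 + g (y-1) (x-1)) (prev.getD (x+1) 0 + g (y-1) x))) r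
      T.set y r) (pvTH Xn Yn g 0)
    = pvTH Xn Yn g k := by
  intro k
  induction k with
  | zero => intro _; rfl
  | succ k ih =>
    intro hk1
    rw [List.range'_concat, one_mul, List.foldl_append, List.foldl_cons, List.foldl_nil,
      ih (by omega)]
    dsimp only
    have hy1 : (pvTH Xn Yn g k).getD (1+k-1) [] = pvRowH Xn g (1+k-1) := by
      rw [pvTH, pv_getD_map_range, if_pos (show 1+k-1 < Yn+1 by omega), if_pos (by omega)]
    have hy0 : (pvTH Xn Yn g k).getD (1+k) [] = List.replicate (Xn+1) 0 := by
      rw [pvTH, pv_getD_map_range, if_pos (show 1+k < Yn+1 by omega), if_neg (by omega)]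
    rw [hy1, hy0]
    rw [pvAH_inner Xn g (1+k) hX (by omega) _ rfl]
    rw [pvTH, pv_set_map_range, pvTH]
    apply pv_map_ext
    intro j hj
    by_cases hj1 : j = 1 + k
    · rw [if_pos hj1, if_pos (by omega), hj1]
    · rw [if_neg hj1]
      by_cases hj2 : j ≤ k
      · rw [if_pos hj2, if_pos (by omega)]
      · rw [if_neg hj2, if_neg (by omega)]

-- ===== B-side memoization lemmas =====

-- the memo invariant: every cached value is the cell's true DP value
def pvInvI (Xn Yn : Nat) (g : Nat → Nat → Int) (m : PySem.Dict (Nat × Nat) Int) : Prop :=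
  ∀ p v, m.get? p = some v → v = pvCellA Xn Yn g p.1 p.2

def pvInvH (Xn : Nat) (g : Nat → Nat → Int) (m : PySem.Dict (Nat × Nat) Int) : Prop :=
  ∀ p v, m.get? p = some v → v = pvCellH Xn g p.1 p.2

theorem pvInv_empty_I (Xn Yn : Nat) (g : Nat → Nat → Int) :
    pvInvI Xn Yn g PySem.Dict.empty := by
  intro p v hp
  rw [PySem.Dict.get?_empty] at hp
  cases hp

theorem pvInv_empty_H (Xn : Nat) (g : Nat → Nat → Int) :
    pvInvH Xn g PySem.Dict.empty := by
  intro p v hp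
  rw [PySem.Dict.get?_empty] at hp
  cases hp

-- one conditional relax step of bBestI, given the recursive call is correct
theorem pvStepI (Xn Yn : Nat) (g : Nat → Nat → Int) (c : Prop) [Decidable c]
    (y' x' : Nat) (t : Int) (p : Int × PySem.Dict (Nat × Nat) Int) (b : Int)
    (hb : p.1 = b) (hI : pvInvI Xn Yn g p.2)
    (hrec : ∀ m, pvInvI Xn Yn g m →
      (bBestI Xn Yn g y' x' m).1 = pvCellA Xn Yn g y' x' ∧ pvInvI Xn Yn g (bBestI Xn Yn g y' x' m).2) :
    (if c then (max p.1 ((bBestI Xn Yn g y' x' p.2).1 + t), (bBestI Xn Yn g y' x' p.2).2) else p).1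
        = (if c then max b (pvCellA Xn Yn g y' x' + t) else b)
    ∧ pvInvI Xn Yn g
      (if c then (max p.1 ((bBestI Xn Yn g y' x' p.2).1 + t), (bBestI Xn Yn g y' x' p.2).2) else p).2 := by
  by_cases hc : c
  · obtain ⟨e, I⟩ := hrec p.2 hI
    rw [if_pos hc, if_pos hc]
    exact ⟨by rw [hb, e], I⟩
  · rw [if_neg hc, if_neg hc]
    exact ⟨hb, hI⟩


-- same, for the two-term (skip-ahead) relax step
theorem pvStepI2 (Xn Yn : Nat) (g : Nat → Nat → Int) (c : Prop) [Decidable c]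
    (y' x' : Nat) (t1 t2 : Int) (p : Int × PySem.Dict (Nat × Nat) Int) (b : Int)
    (hb : p.1 = b) (hI : pvInvI Xn Yn g p.2)
    (hrec : ∀ m, pvInvI Xn Yn g m →
      (bBestI Xn Yn g y' x' m).1 = pvCellA Xn Yn g y' x' ∧ pvInvI Xn Yn g (bBestI Xn Yn g y' x' m).2) :
    (if c then (max p.1 ((bBestI Xn Yn g y' x' p.2).1 + t1 + t2), (bBestI Xn Yn g y' x' p.2).2) else p).1
        = (if c then max b (pvCellA Xn Yn g y' x' + t1 + t2) else b)
    ∧ pvInvI Xn Yn g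
      (if c then (max p.1 ((bBestI Xn Yn g y' x' p.2).1 + t1 + t2), (bBestI Xn Yn g y' x' p.2).2) else p).2 := by
  by_cases hc : c
  · obtain ⟨e, I⟩ := hrec p.2 hI
    rw [if_pos hc, if_pos hc]
    exact ⟨by rw [hb, e], I⟩
  · rw [if_neg hc, if_neg hc]
    exact ⟨hb, hI⟩

-- the computed max-chain of one bBestI cell equals the pvCellA recurrence
def pvChainB (Xn Yn : Nat) (g : Nat → Nat → Int) (v x : Nat) : Int :=
  let b1 : Int := if 1 ≤ x then max 0 (pvCellA Xn Yn g v (x-1) + g (v+1) x) else 0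
  let b2 := if x + 1 < Xn then max b1 (pvCellA Xn Yn g v (x+1) + g (v+1) x) else b1
  let b3 := if 2 ≤ v + 1 then max b2 (pvCellA Xn Yn g (v-1) x + g v x + g (v+1) x) else b2
  if v + 1 = 1 ∨ v + 1 = Yn - 1 then max b3 (pvCellA Xn Yn g v x + g (v+1) x) else b3

theorem pvChainB_eq (Xn Yn : Nat) (g : Nat → Nat → Int) (v x : Nat) :
    pvChainB Xn Yn g v x = pvCellA Xn Yn g (v+1) x := by
  rw [pvChainB, pvCellA]
  by_cases c1 : v + 1 = 1
  · by_cases c2 : v + 1 = Yn - 1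
    · rw [if_pos (Or.inl c1), if_pos c1, if_pos c2, max_assoc, max_self]
    · rw [if_pos (Or.inl c1), if_pos c1, if_neg c2]
  · by_cases c2 : v + 1 = Yn - 1
    · rw [if_pos (Or.inr c2), if_neg c1, if_pos c2]
    · rw [if_neg (show ¬ (v + 1 = 1 ∨ v + 1 = Yn - 1) by tauto), if_neg c1, if_neg c2]

theorem bBestI_correct (Xn Yn : Nat) (g : Nat → Nat → Int) :
    ∀ y x m, pvInvI Xn Yn g m →
      (bBestI Xn Yn g y x m).1 = pvCellA Xn Yn g y x ∧ pvInvI Xn Yn g (bBestI Xn Yn g y x m).2 := by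
  intro y
  induction y using Nat.strong_induction_on with
  | _ y ih =>
    match y with
    | 0 =>
      intro x m hm
      rw [bBestI]
      exact ⟨by rw [pvCellA], hm⟩
    | v + 1 =>
      intro x m hm
      rw [bBestI]
      cases hg : m.get? (v + 1, x) with
      | some w =>
        exact ⟨hm (v + 1, x) w hg, hm⟩
      | none =>
        have h1 := pvStepI Xn Yn g (1 ≤ x) v (x - 1) (g (v+1) x) ((0 : Int), m) 0 rfl hm
          (fun m' hm' => ih v (by omega) (x - 1) m' hm')
        have h2 := pvStepI Xn Yn g (x + 1 < Xn) v (x + 1) (g (v+1) x) _ _ h1.1 h1.2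
          (fun m' hm' => ih v (by omega) (x + 1) m' hm')
        have h3 := pvStepI2 Xn Yn g (2 ≤ v + 1) (v - 1) x (g v x) (g (v+1) x) _ _ h2.1 h2.2
          (fun m' hm' => ih (v - 1) (by omega) x m' hm')
        have h4 := pvStepI Xn Yn g (v + 1 = 1 ∨ v + 1 = Yn - 1) v x (g (v+1) x) _ _ h3.1 h3.2
          (fun m' hm' => ih v (by omega) x m' hm')
        have hmain := h4.1.trans (pvChainB_eq Xn Yn g v x)
        refine ⟨hmain, ?_⟩
        intro p w hp
        rw [PySem.Dict.get?_insert] at hp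
        by_cases hpx : p = (v + 1, x)
        · rw [if_pos hpx] at hp
          cases hp
          rw [hpx]
          exact hmain
        · rw [if_neg hpx] at hp
          exact h4.2 p w hp

theorem pvCaseH (Xn : Nat) (g : Nat → Nat → Int) (v x : Nat)
    (m : PySem.Dict (Nat × Nat) Int) (hm : pvInvH Xn g m)
    (ih : ∀ x' m', pvInvH Xn g m' →
      (bBestH Xn g v x' m').1 = pvCellH Xn g v x' ∧ pvInvH Xn g (bBestH Xn g v x' m').2) :
    (if x = 0 then
        ((bBestH Xn g v 1 m).1 + g v 0, (bBestH Xn g v 1 m).2)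
      else if x = Xn then
        ((bBestH Xn g v (Xn-1) m).1 + g v (Xn-1), (bBestH Xn g v (Xn-1) m).2)
      else
        (max ((bBestH Xn g v (x-1) m).1 + g v (x-1))
           ((bBestH Xn g v (x+1) (bBestH Xn g v (x-1) m).2).1 + g v x),
         (bBestH Xn g v (x+1) (bBestH Xn g v (x-1) m).2).2)).1
      = pvCellH Xn g (v+1) x
    ∧ pvInvH Xn g (if x = 0 then
        ((bBestH Xn g v 1 m).1 + g v 0, (bBestH Xn g v 1 m).2)
      else if x = Xn then
        ((bBestH Xn g v (Xn-1) m).1 + g v (Xn-1), (bBestH Xn g v (Xn-1) m).2)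
      else
        (max ((bBestH Xn g v (x-1) m).1 + g v (x-1))
           ((bBestH Xn g v (x+1) (bBestH Xn g v (x-1) m).2).1 + g v x),
         (bBestH Xn g v (x+1) (bBestH Xn g v (x-1) m).2).2)).2 := by
  by_cases hx0 : x = 0
  · subst hx0
    obtain ⟨e, I⟩ := ih 1 m hm
    rw [if_pos rfl]
    exact ⟨by rw [show pvCellH Xn g (v+1) 0 = pvCellH Xn g v 1 + g v 0 from by
      rw [pvCellH, if_pos rfl]]; rw [e], I⟩
  · by_cases hxX : x = Xn
    · obtain ⟨e, I⟩ := ih (Xn - 1) m hm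
      rw [if_neg hx0, if_pos hxX]
      exact ⟨by rw [show pvCellH Xn g (v+1) x = pvCellH Xn g v (Xn-1) + g v (Xn-1) from by
        rw [pvCellH, if_neg hx0, if_pos hxX]]; rw [e], I⟩
    · obtain ⟨e1, I1⟩ := ih (x - 1) m hm
      obtain ⟨e2, I2⟩ := ih (x + 1) _ I1
      rw [if_neg hx0, if_neg hxX]
      exact ⟨by rw [show pvCellH Xn g (v+1) x
          = max (pvCellH Xn g v (x-1) + g v (x-1)) (pvCellH Xn g v (x+1) + g v x) from by
        rw [pvCellH, if_neg hx0, if_neg hxX]]; rw [e1, e2], I2⟩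

theorem bBestH_correct (Xn : Nat) (g : Nat → Nat → Int) :
    ∀ y x m, pvInvH Xn g m →
      (bBestH Xn g y x m).1 = pvCellH Xn g y x ∧ pvInvH Xn g (bBestH Xn g y x m).2 := by
  intro y
  induction y with
  | zero =>
    intro x m hm
    rw [bBestH]
    exact ⟨by rw [pvCellH], hm⟩
  | succ v ih =>
    intro x m hm
    rw [bBestH]
    cases hg : m.get? (v + 1, x) with
    | some w =>
      exact ⟨hm (v + 1, x) w hg, hm⟩
    | none =>
      have hp := pvCaseH Xn g v x m hm (fun x' m' hm' => ih x' m' hm')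
      refine ⟨hp.1, ?_⟩
      intro p w hpw
      rw [PySem.Dict.get?_insert] at hpw
      by_cases hpx : p = (v + 1, x)
      · rw [if_pos hpx] at hpw
        cases hpw
        rw [hpx]
        exact hp.1
      · rw [if_neg hpx] at hpw
        exact hp.2 p w hpw

-- B's collection fold over the last integer row yields the row of true values
theorem pvB_fold_I (Xn Yn : Nat) (g : Nat → Nat → Int) (Y0 : Nat) :
    ∀ k, ((List.range k).foldl
      (fun (st : List Int × PySem.Dict (Nat × Nat) Int) x =>
        let q := bBestI Xn Yn g Y0 x st.2
        (st.1 ++ [q.1], q.2)) ([], PySem.Dict.empty)).1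
        = (List.range k).map (pvCellA Xn Yn g Y0)
    ∧ pvInvI Xn Yn g ((List.range k).foldl
      (fun (st : List Int × PySem.Dict (Nat × Nat) Int) x =>
        let q := bBestI Xn Yn g Y0 x st.2
        (st.1 ++ [q.1], q.2)) ([], PySem.Dict.empty)).2 := by
  intro k
  induction k with
  | zero => exact ⟨rfl, pvInv_empty_I Xn Yn g⟩
  | succ k ih =>
    rw [List.range_succ, List.foldl_append, List.foldl_cons, List.foldl_nil]
    obtain ⟨e, I⟩ := ih
    obtain ⟨e2, I2⟩ := bBestI_correct Xn Yn g Y0 k _ I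
    constructor
    · dsimp only
      rw [e, e2, List.map_append, List.map_cons, List.map_nil]
    · exact I2

theorem pvB_fold_H (Xn : Nat) (g : Nat → Nat → Int) (Y0 : Nat) :
    ∀ k, ((List.range k).foldl
      (fun (st : List Int × PySem.Dict (Nat × Nat) Int) x =>
        let q := bBestH Xn g Y0 x st.2
        (st.1 ++ [q.1], q.2)) ([], PySem.Dict.empty)).1
        = (List.range k).map (pvCellH Xn g Y0)
    ∧ pvInvH Xn g ((List.range k).foldl
      (fun (st : List Int × PySem.Dict (Nat × Nat) Int) x =>
        let q := bBestH Xn g Y0 x st.2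
        (st.1 ++ [q.1], q.2)) ([], PySem.Dict.empty)).2 := by
  intro k
  induction k with
  | zero => exact ⟨rfl, pvInv_empty_H Xn g⟩
  | succ k ih =>
    rw [List.range_succ, List.foldl_append, List.foldl_cons, List.foldl_nil]
    obtain ⟨e, I⟩ := ih
    obtain ⟨e2, I2⟩ := bBestH_correct Xn g Y0 k _ I
    constructor
    · dsimp only
      rw [e, e2, List.map_append, List.map_cons, List.map_nil]
    · exact I2

-- ===== VERDICT (by name: the statement is the Claim_ definition above) =====
set_option maxHeartbeats 1000000 in
theorem solve_spec : Claim_equal_solve := by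
  intro X Y silver hdom hpre
  obtain ⟨hX, hY, -, -⟩ := hpre
  have hXn : 1 ≤ X.toNat := by omega
  have hYn : 1 ≤ Y.toNat := by omega
  unfold Spec_solve solve solve_alt
  dsimp only
  rw [pvA_init X.toNat Y.toNat (pvGA silver) hYn,
    pvA_outer X.toNat Y.toNat (pvGA silver) hYn (Y.toNat - 1) (le_refl _),
    show (pvTA X.toNat Y.toNat (pvGA silver) (Y.toNat - 1)).getD (Y.toNat - 1) []
        = pvRowA X.toNat Y.toNat (pvGA silver) (Y.toNat - 1) from by
      rw [pvTA, pv_getD_map_range, if_pos (by omega), if_pos (le_refl _)],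
    pvTH_init X.toNat Y.toNat (pvGA silver),
    pvAH_outer X.toNat Y.toNat (pvGA silver) hXn Y.toNat (le_refl _),
    show (pvTH X.toNat Y.toNat (pvGA silver) Y.toNat).getD Y.toNat []
        = pvRowH X.toNat (pvGA silver) Y.toNat from by
      rw [pvTH, pv_getD_map_range, if_pos (by omega), if_pos (le_refl _)],
    (pvB_fold_I X.toNat Y.toNat (pvGA silver) (Y.toNat - 1) X.toNat).1,
    (pvB_fold_H X.toNat (pvGA silver) Y.toNat (X.toNat + 1)).1]
  rfl
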